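-- pv_equiv track=rewrite | github.com/Gentyk/Crypto_lab_2 | task3.py | xorASCII_to_hex
-- ===== SOURCE A (Python) =====
-- import binascii
--
-- def key_xor_word(s,k):
--     n=len(s)//len(k)
--     j=0
--     s1=""
--     while (j<n):
--         s1+=k
--         j+=1
--     n=len(s)%len(k)
--     j=0
--     while(j<n):
--         s1+=k[j]
--         j+=1
--     return s1
--
-- def xorASCII_to_hex(s1,kl):
--     s2 = key_xor_word(s1, kl)
--     s3 = ""
--     j = 0
--     while (j < len(s1)):
--         bins = (ord(s1[j]) ^ ord(s2[j]))
--         bins1 = bins.to_bytes(1, byteorder="big")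
--         s3 += (binascii.b2a_hex(bins1)).decode('UTF-8')
--         j += 1
--     return s3
-- ===== SOURCE B (Python) =====
-- def xorASCII_to_hex(s1, kl):
--     out = []
--     s = s1
--     while s:
--         out.append(''.join('%02x' % (ord(c) ^ ord(k)) for c, k in zip(s, kl)))
--         s = s[len(kl):]
--     return ''.join(out)
-- ===== Notes on version B (the rewrite author's own statement) =====
-- stated objective: alternative
-- what changed: B never materializes the repeated key: it walks the message in key-sized blocks, XORing each block directly against the (single) key with zip truncation handling the ragged tail, and joins the block strings at the end; A first builds a full message-length key string with three while loops and then XORs position-by-position, growing the output by per-character string concatenation.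
import Mathlib
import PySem

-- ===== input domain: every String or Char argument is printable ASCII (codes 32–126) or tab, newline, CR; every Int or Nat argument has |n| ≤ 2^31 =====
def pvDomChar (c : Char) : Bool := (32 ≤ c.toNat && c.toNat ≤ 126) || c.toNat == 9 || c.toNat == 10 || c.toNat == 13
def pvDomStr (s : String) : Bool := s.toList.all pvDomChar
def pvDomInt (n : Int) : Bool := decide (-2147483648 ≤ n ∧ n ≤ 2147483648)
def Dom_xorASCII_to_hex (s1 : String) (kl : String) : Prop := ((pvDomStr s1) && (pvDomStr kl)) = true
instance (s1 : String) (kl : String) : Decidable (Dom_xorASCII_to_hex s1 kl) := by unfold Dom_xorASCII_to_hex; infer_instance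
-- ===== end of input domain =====

-- B walks the message in key-sized blocks XORed directly against the key, never building A's repeated key (objective: alternative).

-- hex of one byte, two lowercase digits — exact for 0 ≤ v < 256
-- (shared leaf: A's binascii.b2a_hex of a 1-byte buffer and B's '%02x' % v both produce exactly this)
def hexDigit (d : Nat) : Char := Char.ofNat (if d < 10 then 48 + d else 87 + d)
def hexByte (v : Nat) : List Char := [hexDigit (v / 16), hexDigit (v % 16)]

-- ===== PORT A =====
-- first while loop of key_xor_word: while j < n: s1 += k
def kxwLoop1 (k : List Char) : Nat → List Char → List Char
  | 0, acc => acc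
  | n + 1, acc => kxwLoop1 k n (acc ++ k)

-- second while loop of key_xor_word: while j < n: s1 += k[j]  (j always in range since n = len(s) % len(k))
def kxwLoop2 (k acc : List Char) (j m : Nat) : List Char :=
  if j < m then kxwLoop2 k (acc ++ [k[j]?.getD ' ']) (j + 1) m else acc
  termination_by m - j

def keyXorWord (s k : List Char) : List Char :=
  kxwLoop2 k (kxwLoop1 k (s.length / k.length) []) 0 (s.length % k.length)

-- main while loop: while j < len(s1): s3 += hex(ord s1[j] ^ ord s2[j])  (indices always in range)
def mainLoop (a b acc : List Char) (j : Nat) : List Char :=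
  if j < a.length then
    mainLoop a b (acc ++ hexByte ((a[j]?.getD ' ').toNat ^^^ (b[j]?.getD ' ').toNat)) (j + 1)
  else acc
  termination_by a.length - j

def xorASCII_to_hex (s1 : String) (kl : String) : String :=
  String.ofList (mainLoop s1.toList (keyXorWord s1.toList kl.toList) [] 0)

-- ===== PORT B =====
-- B's while loop: while s: out.append(hex of zip(s, kl)); s = s[len(kl):]
-- (the 'k = [] → out' branch is a totality guard only: there Python's loop makes no progress, outside Pre_)
def altLoop (k s : List Char) (out : List (List Char)) : List (List Char) :=
  if s = [] then out
  else if k = [] then out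
  else altLoop k (s.drop k.length)
      (out ++ [(List.zipWith (fun c kc => hexByte (c.toNat ^^^ kc.toNat)) s k).flatten])
  termination_by s.length
  decreasing_by
    simp only [List.length_drop]
    have hs : s.length ≠ 0 := by simpa [List.length_eq_zero_iff] using ‹¬ s = []›
    have hk : k.length ≠ 0 := by simpa [List.length_eq_zero_iff] using ‹¬ k = []›
    omega

def xorASCII_to_hex_alt (s1 : String) (kl : String) : String :=
  String.ofList ((altLoop kl.toList s1.toList []).flatten)

-- ===== PRECONDITION & SPEC =====
-- Pre_ excludes only kl = "" : there A raises ZeroDivisionError (len(s1)//len(kl)); B's loop makes no progress.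
def Pre_xorASCII_to_hex (s1 : String) (kl : String) : Prop := kl ≠ ""
instance (s1 : String) (kl : String) : Decidable (Pre_xorASCII_to_hex s1 kl) := by unfold Pre_xorASCII_to_hex; infer_instance
def pvWitness_xorASCII_to_hex : String × String := ("ab", "k")

def Spec_xorASCII_to_hex (s1 : String) (kl : String) (out : String) : Prop := out = xorASCII_to_hex_alt s1 kl
instance (s1 : String) (kl : String) (out : String) : Decidable (Spec_xorASCII_to_hex s1 kl out) := by unfold Spec_xorASCII_to_hex; infer_instance

-- ===== CLAIM (what is proved, stated in full; the proofs are below) =====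
def Claim_equal_xorASCII_to_hex : Prop := ∀ (s1 : String) (kl : String), Dom_xorASCII_to_hex s1 kl → Pre_xorASCII_to_hex s1 kl → Spec_xorASCII_to_hex s1 kl (xorASCII_to_hex s1 kl)

-- ===== LEMMAS AND PROOFS =====

theorem kxwLoop1_eq (k : List Char) : ∀ n acc, kxwLoop1 k n acc = acc ++ (List.replicate n k).flatten := by
  intro n
  induction n with
  | zero => intro acc; simp [kxwLoop1]
  | succ n ih =>
    intro acc
    simp [kxwLoop1, ih, List.replicate_succ]

theorem kxwLoop2_eq (k : List Char) : ∀ j m acc, m ≤ k.length →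
    kxwLoop2 k acc j m = acc ++ ((k.take m).drop j) := by
  intro j m
  induction hfuel : m - j using Nat.strong_induction_on generalizing j with
  | _ f ih =>
    intro acc hm
    by_cases hj : j < m
    · have hjk : j < k.length := lt_of_lt_of_le hj hm
      have hlt : m - (j + 1) < f := by omega
      rw [kxwLoop2, if_pos hj, ih _ (hfuel ▸ hlt) (j + 1) rfl _ hm]
      have hdrop : (k.take m).drop j = k[j] :: (k.take m).drop (j + 1) := by
        rw [List.drop_eq_getElem_cons (by simp; omega)]
        congr 1
        simp [List.getElem_take]
      rw [hdrop]
      simp [List.getElem?_eq_getElem hjk]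
    · rw [kxwLoop2, if_neg hj]
      have hnil : (k.take m).drop j = [] := List.drop_eq_nil_of_le (by simp; omega)
      simp [hnil]

theorem mainLoop_eq (a b : List Char) (hb : a.length ≤ b.length) :
    ∀ j acc, mainLoop a b acc j =
      acc ++ (List.zipWith (fun x y => hexByte (x.toNat ^^^ y.toNat)) (a.drop j) (b.drop j)).flatten := by
  intro j
  induction hfuel : a.length - j using Nat.strong_induction_on generalizing j with
  | _ f ih =>
    intro acc
    by_cases hj : j < a.length
    · have hjb : j < b.length := lt_of_lt_of_le hj hb
      have hlt : a.length - (j + 1) < f := by omega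
      rw [mainLoop, if_pos hj, ih _ (hfuel ▸ hlt) (j + 1) rfl]
      rw [List.drop_eq_getElem_cons hj, List.drop_eq_getElem_cons hjb,
        List.zipWith_cons_cons, List.flatten_cons]
      simp [List.getElem?_eq_getElem hj, List.getElem?_eq_getElem hjb]
    · have hnil : a.drop j = [] := List.drop_eq_nil_of_le (by omega)
      rw [mainLoop, if_neg hj]
      simp [hnil]

theorem key_eq (s k : List Char) (hk : k ≠ []) :
    keyXorWord s k = ((List.replicate (s.length / k.length + 1) k).flatten).take s.length := by
  have hkpos : 0 < k.length := List.length_pos_iff.mpr hk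
  have hdm := Nat.div_add_mod s.length k.length
  have hm : s.length % k.length < k.length := Nat.mod_lt _ hkpos
  rw [keyXorWord, kxwLoop1_eq, kxwLoop2_eq k 0 _ _ (le_of_lt hm)]
  have hlen : ((List.replicate (s.length / k.length) k).flatten).length
      = k.length * (s.length / k.length) := by
    simp [Nat.mul_comm]
  rw [List.replicate_succ', List.flatten_append, List.take_append]
  have h1 : (((List.replicate (s.length / k.length) k).flatten)).take s.length
      = (List.replicate (s.length / k.length) k).flatten :=
    List.take_of_length_le (by rw [hlen]; omega)
  have h2 : s.length - ((List.replicate (s.length / k.length) k).flatten).length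
      = s.length % k.length := by rw [hlen]; omega
  rw [h1, h2]
  simp

-- zipWith only looks at the first s.length elements of its right argument
theorem zipWith_right_take {α β γ : Type} (f : α → β → γ) :
    ∀ (s : List α) (t : List β), List.zipWith f s (t.take s.length) = List.zipWith f s t := by
  intro s
  induction s with
  | nil => intro t; simp
  | cons a s ih =>
    intro t
    cases t with
    | nil => simp
    | cons b t => simp [ih]

-- zipWith only looks at the first k.length elements of its left argument
theorem zipWith_take_left_len {α β γ : Type} (f : α → β → γ) :
    ∀ (s : List α) (k : List β), List.zipWith f (s.take k.length) k = List.zipWith f s k := by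
  intro s
  induction s with
  | nil => intro k; simp
  | cons a s ih =>
    intro k
    cases k with
    | nil => simp
    | cons b k => simp [ih]

-- core: B's block loop computes the flattened zip of s with a long-enough repeated key
theorem altLoop_eq (k : List Char) (hk : k ≠ []) :
    ∀ s N out, s.length ≤ N * k.length →
      (altLoop k s out).flatten =
        out.flatten ++
          (List.zipWith (fun x y => hexByte (x.toNat ^^^ y.toNat)) s ((List.replicate N k).flatten)).flatten := by
  have hkpos : 0 < k.length := List.length_pos_iff.mpr hk
  intro s
  induction hfuel : s.length using Nat.strong_induction_on generalizing s with
  | _ f ih =>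
    intro N out hN
    by_cases hs : s = []
    · subst hs; rw [altLoop]; simp
    · have hspos : 0 < s.length := List.length_pos_iff.mpr hs
      have hN1 : 1 ≤ N := by by_contra h; interval_cases N <;> omega
      obtain ⟨N', rfl⟩ : ∃ N', N = N' + 1 := ⟨N - 1, by omega⟩
      rw [altLoop, if_neg hs, if_neg hk]
      have hrep : (List.replicate (N' + 1) k).flatten = k ++ (List.replicate N' k).flatten := by
        simp [List.replicate_succ]
      by_cases hle : s.length ≤ k.length
      · -- last (possibly ragged) block: the tail is empty
        have hdrop : s.drop k.length = [] := List.drop_eq_nil_of_le hle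
        rw [hdrop, altLoop]
        simp only [if_pos, List.flatten_append, List.flatten_cons, List.flatten_nil,
          List.append_nil]
        rw [hrep]
        have : List.zipWith (fun x y => hexByte (x.toNat ^^^ y.toNat)) s
            (k ++ (List.replicate N' k).flatten)
            = List.zipWith (fun x y => hexByte (x.toNat ^^^ y.toNat)) s k := by
          rw [← zipWith_right_take _ s (k ++ (List.replicate N' k).flatten),
            List.take_append_of_le_length hle, zipWith_right_take]
        rw [this]
      · -- full block: peel k.length characters and recurse
        have hlt : (s.drop k.length).length < f := by simp; omega
        rw [ih _ (hfuel ▸ hlt) (s.drop k.length) rfl N'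
            (out ++ [(List.zipWith (fun c kc => hexByte (c.toNat ^^^ kc.toNat)) s k).flatten])
            (by simp; rw [Nat.succ_mul] at hN; omega)]
        rw [hrep]
        conv_rhs => rw [← List.take_append_drop k.length s]
        rw [List.zipWith_append (by rw [List.length_take]; omega)]
        have htake : List.zipWith (fun x y => hexByte (x.toNat ^^^ y.toNat)) (s.take k.length) k
            = List.zipWith (fun x y => hexByte (x.toNat ^^^ y.toNat)) s k := by
          exact zipWith_take_left_len _ s k
        simp [htake]

theorem xorASCII_to_hex_spec : Claim_equal_xorASCII_to_hex := by
  intro s1 kl _ hpre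
  unfold Spec_xorASCII_to_hex xorASCII_to_hex xorASCII_to_hex_alt
  have hk : kl.toList ≠ [] := by
    intro h
    exact hpre (String.toList_eq_nil_iff.mp h)
  have hkpos : 0 < kl.toList.length := List.length_pos_iff.mpr hk
  have hdm := Nat.div_add_mod s1.toList.length kl.toList.length
  have hmod := Nat.mod_lt s1.toList.length hkpos
  set s := s1.toList
  set k := kl.toList
  have hlen : s.length ≤ (s.length / k.length + 1) * k.length := by
    rw [Nat.add_mul, Nat.one_mul, Nat.mul_comm]
    omega
  have hklen : s.length ≤ (keyXorWord s k).length := by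
    rw [key_eq _ _ hk, List.length_take, List.length_flatten, List.map_replicate,
      List.sum_replicate, smul_eq_mul]
    omega
  rw [mainLoop_eq _ _ hklen 0 [], key_eq _ _ hk,
    altLoop_eq k hk s (s.length / k.length + 1) [] hlen]
  simp [zipWith_right_take]
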